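-- pv_equiv track=rewrite | github.com/yeongsummer/Algorithm | BOJ/BOJ_10157.py | concert
-- ===== SOURCE A (Python) =====
-- def concert(K,N,M):
--     if K > N*M:
--         return [0]
--
--     matrix = [[0 for _ in range(N)] for i in range(M)]
--     dx = [-1, 0, 1, 0]
--     dy = [0, 1, 0, -1]
--
--     cnt = 1
--     i, j = M, 0
--     k = 0
--     while cnt <= N*M:
--         x, y = i+dx[k], j+dy[k]
--         if -1 < x < M and -1 < y < N and matrix[x][y] == 0:
--             if cnt == K:
--                 return [y+1, M-x]
--
--             matrix[x][y] = cnt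
--             cnt += 1
--             i, j = x, y
--         else:
--             k = (k+1) % 4
-- ===== SOURCE B (Python) =====
-- def concert(K, N, M):
--     if K > N * M:
--         return [0]
--     k = K
--     for l in range((min(N, M) + 1) // 2):
--         n = N - 2 * l
--         m = M - 2 * l
--         per = 2 * (n + m) - 4 if n > 1 and m > 1 else n * m
--         if k <= per:
--             if k <= m:
--                 return [l + 1, l + k]
--             k -= m
--             if k <= n - 1:
--                 return [l + 1 + k, l + m]
--             k -= n - 1
--             if k <= m - 1:
--                 return [l + n, l + m - k]
--             return [l + n - (k - (m - 1)), l + 1]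
--         k -= per
-- ===== Notes on version B (the rewrite author's own statement) =====
-- stated objective: faster
-- what changed: B replaces A's cell-by-cell spiral simulation over an allocated N*M matrix by ring arithmetic: it subtracts ring perimeters to find the ring containing seat K and computes the coordinates in that ring with closed-form leg formulas, in O(min(N,M)) time and O(1) space.
-- outside the precondition, e.g. on concert(0, 7, 9): A returns None, B returns [1, 0]; on concert(-3, 2, 2): A returns None, B returns [1, -3]; on concert(0, 2, 3): A returns None, B returns [1, 0]
import Mathlib
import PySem

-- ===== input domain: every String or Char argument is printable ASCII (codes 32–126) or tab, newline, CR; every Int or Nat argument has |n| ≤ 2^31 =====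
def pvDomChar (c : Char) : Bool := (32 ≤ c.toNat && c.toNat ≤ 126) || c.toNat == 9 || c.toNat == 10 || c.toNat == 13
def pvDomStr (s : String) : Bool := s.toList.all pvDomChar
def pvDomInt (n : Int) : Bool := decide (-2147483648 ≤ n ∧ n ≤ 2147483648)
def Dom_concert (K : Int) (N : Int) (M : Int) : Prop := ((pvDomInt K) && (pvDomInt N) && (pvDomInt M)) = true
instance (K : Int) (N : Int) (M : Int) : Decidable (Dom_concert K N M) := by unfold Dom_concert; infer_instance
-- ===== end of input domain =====

-- B replaces A's O(N*M) cell-by-cell spiral simulation by O(min(N,M)) ring arithmetic (objective: faster).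

-- ===== PORT A =====
-- dx = [-1, 0, 1, 0] / dy = [0, 1, 0, -1] indexed by k ∈ {0,1,2,3}: exact table of A's constant lists
def dxA (k : Int) : Int := if k = 0 then -1 else if k = 1 then 0 else if k = 2 then 1 else 0
def dyA (k : Int) : Int := if k = 0 then 0 else if k = 1 then 1 else if k = 2 then 0 else -1

-- A's matrix is represented as a function Int → Int → Int with pointwise update: reads and
-- writes are exactly the Python list-of-lists reads/writes (indices are always in range when read).
-- The while-loop is ported with fuel; fuel 4*N*M+4 is proved sufficient on Pre_ (A's loop runs
-- at most per-ring 2n+2m iterations; outside Pre_ A loops forever or returns None).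
def loopA (K N M : Int) (mat : Int → Int → Int) (cnt i j k : Int) : Nat → List Int
  | 0 => []
  | Nat.succ fuel =>
    if cnt ≤ N * M then
      let x := i + dxA k
      let y := j + dyA k
      if -1 < x ∧ x < M ∧ -1 < y ∧ y < N ∧ mat x y = 0 then
        if cnt = K then [y + 1, M - x]
        else loopA K N M (fun a b => if a = x ∧ b = y then cnt else mat a b) (cnt + 1) x y k fuel
      else loopA K N M mat cnt i j (PySem.Int.mod (k + 1) 4) fuel
    else []

def concert (K : Int) (N : Int) (M : Int) : List Int :=
  if K > N * M then [0]
  else loopA K N M (fun _ _ => 0) 1 M 0 0 (4 * (N * M) + 4).toNat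

-- ===== PORT B =====
def ringPosB (l k n m : Int) : List Int :=
  if k ≤ m then [l + 1, l + k]
  else
    let k2 := k - m
    if k2 ≤ n - 1 then [l + 1 + k2, l + m]
    else
      let k3 := k2 - (n - 1)
      if k3 ≤ m - 1 then [l + n, l + m - k3]
      else [l + n - (k3 - (m - 1)), l + 1]

-- B's for-loop over l ∈ range((min(N,M)+1)//2), ported as recursion on the remaining range length
def altLoop (N M : Int) (k l : Int) : Nat → List Int
  | 0 => []
  | Nat.succ rem =>
    let n := N - 2 * l
    let m := M - 2 * l
    let per := if 1 < n ∧ 1 < m then 2 * (n + m) - 4 else n * m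
    if k ≤ per then ringPosB l k n m
    else altLoop N M (k - per) (l + 1) rem

def concert_alt (K : Int) (N : Int) (M : Int) : List Int :=
  if K > N * M then [0]
  else altLoop N M K 0 (PySem.Int.floordiv (min N M + 1) 2).toNat

-- ===== PRECONDITION & SPEC =====
-- Pre_ excludes exactly the inputs where A never returns a list: if K ≤ N*M but K ≤ 0 or N ≤ 0 or
-- M ≤ 0, A's while-loop either falls through returning None (not a list) or spins forever.
def Pre_concert (K : Int) (N : Int) (M : Int) : Prop := N * M < K ∨ (1 ≤ K ∧ 1 ≤ N ∧ 1 ≤ M)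
instance (K : Int) (N : Int) (M : Int) : Decidable (Pre_concert K N M) := by unfold Pre_concert; infer_instance

def pvWitness_concert : Int × Int × Int := (5, 3, 4)

def Spec_concert (K : Int) (N : Int) (M : Int) (out : List Int) : Prop := out = concert_alt K N M
instance (K : Int) (N : Int) (M : Int) (out : List Int) : Decidable (Spec_concert K N M out) := by unfold Spec_concert; infer_instance

-- ===== CLAIM (what is proved, stated in full; the proofs are below) =====
def Claim_equal_concert : Prop := ∀ (K : Int) (N : Int) (M : Int), Dom_concert K N M → Pre_concert K N M → Spec_concert K N M (concert K N M)

-- ===== LEMMAS AND PROOFS =====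

-- cell (x,y) is inside the grid ("-1 < x < M and -1 < y < N")
def Inb (N M x y : Int) : Prop := -1 < x ∧ x < M ∧ -1 < y ∧ y < N

-- the straight segment of s cells starting one step after (i,j) in direction (d1,d2)
def Seg (i j d1 d2 s a b : Int) : Prop := ∃ p : Int, 1 ≤ p ∧ p ≤ s ∧ a = i + p * d1 ∧ b = j + p * d2

lemma dir_inj (k : Int) (hk : k = 0 ∨ k = 1 ∨ k = 2 ∨ k = 3) (p q : Int)
    (h1 : p * dxA k = q * dxA k) (h2 : p * dyA k = q * dyA k) : p = q := by
  rcases hk with rfl | rfl | rfl | rfl <;> simp [dxA, dyA] at h1 h2 <;> omega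

-- A straight run that reaches cnt = K after t more placements returns the coordinate formula.
lemma runA_ret (t : Nat) : ∀ (K N M : Int) (mat : Int → Int → Int) (c i j k : Int) (fuel : Nat),
    (k = 0 ∨ k = 1 ∨ k = 2 ∨ k = 3) → c = K - t → K ≤ N * M →
    (∀ p : Int, 1 ≤ p → p ≤ (t : Int) + 1 →
      Inb N M (i + p * dxA k) (j + p * dyA k) ∧ mat (i + p * dxA k) (j + p * dyA k) = 0) →
    t + 1 ≤ fuel →
    loopA K N M mat c i j k fuel
      = [j + ((t : Int) + 1) * dyA k + 1, M - (i + ((t : Int) + 1) * dxA k)] := by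
  induction t with
  | zero =>
    intro K N M mat c i j k fuel hk hc hK hz hfuel
    obtain ⟨f, rfl⟩ : ∃ f, fuel = f + 1 := ⟨fuel - 1, by omega⟩
    obtain ⟨hin, hz1⟩ := hz 1 (by omega) (by norm_num)
    simp only [one_mul] at hin hz1
    unfold Inb at hin
    simp only [loopA]
    rw [if_pos (by omega : c ≤ N * M),
        if_pos (by exact ⟨hin.1, hin.2.1, hin.2.2.1, hin.2.2.2, hz1⟩),
        if_pos (by omega : c = K)]
    norm_num
  | succ t ih =>
    intro K N M mat c i j k fuel hk hc hK hz hfuel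
    obtain ⟨f, rfl⟩ : ∃ f, fuel = f + 1 := ⟨fuel - 1, by omega⟩
    obtain ⟨hin, hz1⟩ := hz 1 (by omega) (by push_cast; omega)
    simp only [one_mul] at hin hz1
    unfold Inb at hin
    simp only [loopA]
    rw [if_pos (by push_cast at hc; omega : c ≤ N * M),
        if_pos (by exact ⟨hin.1, hin.2.1, hin.2.2.1, hin.2.2.2, hz1⟩),
        if_neg (by push_cast at hc; omega : ¬ c = K)]
    rw [ih K N M _ (c + 1) (i + dxA k) (j + dyA k) k f hk (by push_cast at hc ⊢; omega) hK ?_ (by omega)]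
    · congr 2 <;> push_cast <;> ring
    · intro p hp1 hp2
      have hcell1 : i + dxA k + p * dxA k = i + (p + 1) * dxA k := by ring
      have hcell2 : j + dyA k + p * dyA k = j + (p + 1) * dyA k := by ring
      rw [hcell1, hcell2]
      obtain ⟨hin', hz'⟩ := hz (p + 1) (by omega) (by push_cast at hp2 ⊢; omega)
      refine ⟨hin', ?_⟩
      have hne : ¬ (i + (p + 1) * dxA k = i + dxA k ∧ j + (p + 1) * dyA k = j + dyA k) := by
        rintro ⟨e1, e2⟩
        have := dir_inj k hk (p + 1) 1 (by omega) (by omega)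
        omega
      simp only [hne, if_false]
      exact hz'

-- A straight run of s placements followed by a blocked step and a turn.
lemma runA_cont (s : Nat) : ∀ (K N M : Int) (mat : Int → Int → Int) (c i j k : Int) (fuel : Nat),
    (k = 0 ∨ k = 1 ∨ k = 2 ∨ k = 3) → 1 ≤ c → c + s ≤ K → K ≤ N * M →
    (∀ p : Int, 1 ≤ p → p ≤ (s : Int) →
      Inb N M (i + p * dxA k) (j + p * dyA k) ∧ mat (i + p * dxA k) (j + p * dyA k) = 0) →
    (¬ Inb N M (i + ((s : Int) + 1) * dxA k) (j + ((s : Int) + 1) * dyA k) ∨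
      mat (i + ((s : Int) + 1) * dxA k) (j + ((s : Int) + 1) * dyA k) ≠ 0) →
    s + 1 ≤ fuel →
    ∃ mat' : Int → Int → Int,
      loopA K N M mat c i j k fuel
        = loopA K N M mat' (c + s) (i + (s : Int) * dxA k) (j + (s : Int) * dyA k)
            (PySem.Int.mod (k + 1) 4) (fuel - (s + 1)) ∧
      ∀ a b : Int, (Seg i j (dxA k) (dyA k) (s : Int) a b → mat' a b ≠ 0) ∧
                   (¬ Seg i j (dxA k) (dyA k) (s : Int) a b → mat' a b = mat a b) := by
  induction s with
  | zero =>
    intro K N M mat c i j k fuel hk hc1 hcK hK hz hblock hfuel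
    obtain ⟨f, rfl⟩ : ∃ f, fuel = f + 1 := ⟨fuel - 1, by omega⟩
    refine ⟨mat, ?_, ?_⟩
    · simp only [loopA]
      rw [if_pos (by push_cast at hcK; omega : c ≤ N * M), if_neg]
      · norm_num
      · push_cast at hblock
        simp only [one_mul] at hblock
        unfold Inb at hblock
        rintro ⟨h1, h2, h3, h4, h5⟩
        rcases hblock with h | h
        · exact h ⟨h1, h2, h3, h4⟩
        · exact h h5
    · intro a b
      refine ⟨?_, fun _ => rfl⟩
      rintro ⟨p, hp1, hps, rfl, rfl⟩
      push_cast at hps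
      omega
  | succ s ih =>
    intro K N M mat c i j k fuel hk hc1 hcK hK hz hblock hfuel
    obtain ⟨f, rfl⟩ : ∃ f, fuel = f + 1 := ⟨fuel - 1, by omega⟩
    obtain ⟨hin, hz1⟩ := hz 1 (by omega) (by push_cast; omega)
    simp only [one_mul] at hin hz1
    unfold Inb at hin
    have hmm : ∀ p : Int, p ≠ 1 →
        (fun a b => if a = i + dxA k ∧ b = j + dyA k then c else mat a b)
          (i + p * dxA k) (j + p * dyA k) = mat (i + p * dxA k) (j + p * dyA k) := by
      intro p hp
      have hne : ¬ (i + p * dxA k = i + dxA k ∧ j + p * dyA k = j + dyA k) := by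
        rintro ⟨e1, e2⟩
        exact hp (dir_inj k hk p 1 (by omega) (by omega))
      simp only [hne, if_false]
    have hz' : ∀ p : Int, 1 ≤ p → p ≤ (s : Int) →
        Inb N M (i + dxA k + p * dxA k) (j + dyA k + p * dyA k) ∧
        (fun a b => if a = i + dxA k ∧ b = j + dyA k then c else mat a b)
          (i + dxA k + p * dxA k) (j + dyA k + p * dyA k) = 0 := by
      intro p hp1 hps
      rw [show i + dxA k + p * dxA k = i + (p + 1) * dxA k by ring,
          show j + dyA k + p * dyA k = j + (p + 1) * dyA k by ring, hmm (p + 1) (by omega)]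
      exact hz (p + 1) (by omega) (by push_cast at hps ⊢; omega)
    have hblock' : ¬ Inb N M (i + dxA k + ((s : Int) + 1) * dxA k) (j + dyA k + ((s : Int) + 1) * dyA k) ∨
        (fun a b => if a = i + dxA k ∧ b = j + dyA k then c else mat a b)
          (i + dxA k + ((s : Int) + 1) * dxA k) (j + dyA k + ((s : Int) + 1) * dyA k) ≠ 0 := by
      rw [show i + dxA k + ((s : Int) + 1) * dxA k = i + ((s : Int) + 2) * dxA k by ring,
          show j + dyA k + ((s : Int) + 1) * dyA k = j + ((s : Int) + 2) * dyA k by ring,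
          hmm ((s : Int) + 2) (by omega)]
      rcases hblock with h | h
      · left
        rw [show i + (((s + 1 : Nat) : Int) + 1) * dxA k = i + ((s : Int) + 2) * dxA k by push_cast; ring,
            show j + (((s + 1 : Nat) : Int) + 1) * dyA k = j + ((s : Int) + 2) * dyA k by push_cast; ring] at h
        exact h
      · right
        rw [show i + (((s + 1 : Nat) : Int) + 1) * dxA k = i + ((s : Int) + 2) * dxA k by push_cast; ring,
            show j + (((s + 1 : Nat) : Int) + 1) * dyA k = j + ((s : Int) + 2) * dyA k by push_cast; ring] at h
        exact h
    obtain ⟨mat', heq, hprops⟩ := ih K N M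
      (fun a b => if a = i + dxA k ∧ b = j + dyA k then c else mat a b)
      (c + 1) (i + dxA k) (j + dyA k) k f hk (by omega) (by push_cast at hcK ⊢; omega) hK
      hz' hblock' (by omega)
    refine ⟨mat', ?_, ?_⟩
    · simp only [loopA]
      rw [if_pos (by push_cast at hcK; omega : c ≤ N * M),
          if_pos (by exact ⟨hin.1, hin.2.1, hin.2.2.1, hin.2.2.2, hz1⟩),
          if_neg (by push_cast at hcK; omega : ¬ c = K)]
      rw [show i + ((s + 1 : Nat) : Int) * dxA k = (i + dxA k) + (s : Int) * dxA k by push_cast; ring,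
          show j + ((s + 1 : Nat) : Int) * dyA k = (j + dyA k) + (s : Int) * dyA k by push_cast; ring,
          show c + ((s + 1 : Nat) : Int) = (c + 1) + (s : Int) by push_cast; ring,
          show f + 1 - (s + 1 + 1) = f - (s + 1) by omega]
      exact heq
    · intro a b
      constructor
      · rintro ⟨p, hp1, hps, rfl, rfl⟩
        push_cast at hps
        by_cases hp : p = 1
        · subst hp
          have hnotseg : ¬ Seg (i + dxA k) (j + dyA k) (dxA k) (dyA k) (s : Int)
              (i + 1 * dxA k) (j + 1 * dyA k) := by
            rintro ⟨q, hq1, hqs, e1, e2⟩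
            have := dir_inj k hk 1 (q + 1) (by linear_combination e1) (by linear_combination e2)
            omega
          rw [(hprops _ _).2 hnotseg]
          simp only [one_mul, and_self, if_pos]
          omega
        · have hmem : Seg (i + dxA k) (j + dyA k) (dxA k) (dyA k) (s : Int)
              (i + p * dxA k) (j + p * dyA k) := by
            exact ⟨p - 1, by omega, by omega, by ring, by ring⟩
          exact (hprops _ _).1 hmem
      · intro hnot
        have hnotseg : ¬ Seg (i + dxA k) (j + dyA k) (dxA k) (dyA k) (s : Int) a b := by
          rintro ⟨q, hq1, hqs, rfl, rfl⟩
          exact hnot ⟨q + 1, by omega, by omega, by ring, by ring⟩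
        exact ((hprops a b).2 hnotseg).trans (if_neg (by
          rintro ⟨rfl, rfl⟩
          exact hnot ⟨1, by omega, by omega, by ring, by ring⟩))

-- One spiral ring: from the ring-entry state, A's loop agrees with B's ring recursion.
set_option maxHeartbeats 2000000 in
lemma ring_step (rem : Nat) : ∀ (K N M l c : Int) (mat : Int → Int → Int) (fuel : Nat),
    0 ≤ l → 1 ≤ N - 2 * l → 1 ≤ M - 2 * l → 1 ≤ c →
    c + (N - 2 * l) * (M - 2 * l) = N * M + 1 →
    c ≤ K → K ≤ N * M →
    (∀ x y : Int, -1 < x → x < M → -1 < y → y < N →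
      (mat x y = 0 ↔ (l ≤ x ∧ x ≤ M - 1 - l ∧ l ≤ y ∧ y ≤ N - 1 - l))) →
    4 * ((N - 2 * l) * (M - 2 * l)) + 4 ≤ (fuel : Int) →
    (N ≤ 2 * l + 2 * (rem : Int) ∨ M ≤ 2 * l + 2 * (rem : Int)) →
    loopA K N M mat c (M - l) l 0 fuel = altLoop N M (K - c + 1) l rem := by
  induction rem with
  | zero =>
    intro K N M l c mat fuel hl hn hm hc1 hcP hcK hK hmat hfuel hrem
    exfalso
    push_cast at hrem
    omega
  | succ rem ih =>
    intro K N M l c mat fuel hl hn hm hc1 hcP hcK hK hmat hfuel hrem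
    have hd0x : dxA 0 = -1 := by norm_num [dxA]
    have hd0y : dyA 0 = 0 := by norm_num [dyA]
    have hd1x : dxA 1 = 0 := by norm_num [dxA]
    have hd1y : dyA 1 = 1 := by norm_num [dyA]
    have hd2x : dxA 2 = 1 := by norm_num [dxA]
    have hd2y : dyA 2 = 0 := by norm_num [dyA]
    have hd3x : dxA 3 = 0 := by norm_num [dxA]
    have hd3y : dyA 3 = -1 := by norm_num [dyA]
    have hEXP : (N - 2*(l+1))*(M - 2*(l+1)) = (N - 2*l)*(M - 2*l) - 2*(N - 2*l) - 2*(M - 2*l) + 4 := by ring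
    have hPm : M - 2*l ≤ (N - 2*l)*(M - 2*l) := by nlinarith
    have hPn : N - 2*l ≤ (N - 2*l)*(M - 2*l) := by nlinarith
    have hTP : K - c + 1 ≤ (N - 2*l)*(M - 2*l) := by omega
    have hdegN : N - 2*l = 1 → (N - 2*l)*(M - 2*l) = M - 2*l := by intro h; rw [h]; ring
    have hdegM : M - 2*l = 1 → (N - 2*l)*(M - 2*l) = N - 2*l := by intro h; rw [h]; ring
    have hdegN2 : N - 2*l = 2 → (N - 2*l)*(M - 2*l) = 2*(M - 2*l) := by intro h; rw [h]
    have hdegM2 : M - 2*l = 2 → (N - 2*l)*(M - 2*l) = 2*(N - 2*l) := by intro h; rw [h]; ring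
    simp only [altLoop, ringPosB]
    by_cases hC1 : K - c + 1 ≤ M - 2*l
    · -- C1: K is reached on the upward leg
      have hT : ((K - c).toNat : Int) = K - c := Int.toNat_of_nonneg (by omega)
      rw [runA_ret (K - c).toNat K N M mat c (M - l) l 0 fuel (Or.inl rfl) (by omega) hK
          (by
            intro p hp1 hp2
            rw [hd0x, hd0y]
            refine ⟨⟨by omega, by omega, by omega, by omega⟩, ?_⟩
            exact (hmat (M - l + p * (-1)) (l + p * 0) (by omega) (by omega) (by omega)
              (by omega)).mpr ⟨by omega, by omega, by omega, by omega⟩)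
          (by omega)]
      rw [hd0x, hd0y]
      split_ifs <;> first
        | (exfalso; omega)
        | (simp only [List.cons.injEq, and_true]; omega)
    · have hn2 : 2 ≤ N - 2*l := by
        rcases (by omega : N - 2*l = 1 ∨ 2 ≤ N - 2*l) with h | h
        · have := hdegN h; omega
        · exact h
      by_cases hC2 : K - c + 1 ≤ (M - 2*l) + (N - 2*l) - 1
      · -- C2: K is reached on the rightward leg
        obtain ⟨mat1, heq1, hp1⟩ := runA_cont (M - 2*l).toNat K N M mat c (M - l) l 0 fuel
          (Or.inl rfl) hc1 (by omega) hK
          (by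
            intro p hq1 hq2
            rw [hd0x, hd0y]
            refine ⟨⟨by omega, by omega, by omega, by omega⟩, ?_⟩
            exact (hmat (M - l + p * (-1)) (l + p * 0) (by omega) (by omega) (by omega)
              (by omega)).mpr ⟨by omega, by omega, by omega, by omega⟩)
          (by
            rw [hd0x, hd0y]
            by_cases hl0 : l = 0
            · left
              rintro ⟨hx, -, -, -⟩
              omega
            · right
              intro h0
              have := (hmat _ _ (by omega) (by omega) (by omega) (by omega)).mp h0
              omega)
          (by omega)
        rw [heq1,
            show M - l + ((M - 2*l).toNat : Int) * dxA 0 = l by rw [hd0x]; omega,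
            show l + ((M - 2*l).toNat : Int) * dyA 0 = l by rw [hd0y]; omega,
            show PySem.Int.mod (0 + 1) 4 = 1 by decide]
        rw [runA_ret (K - (c + ((M - 2*l).toNat : Int))).toNat K N M mat1
            (c + ((M - 2*l).toNat : Int)) l l 1 (fuel - ((M - 2*l).toNat + 1))
            (Or.inr (Or.inl rfl)) (by omega) hK
            (by
              intro p hq1 hq2
              rw [hd1x, hd1y]
              refine ⟨⟨by omega, by omega, by omega, by omega⟩, ?_⟩
              rw [(hp1 (l + p * 0) (l + p * 1)).2 (by
                rintro ⟨q, hr1, hr2, ha, hb⟩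
                rw [hd0y] at hb
                omega)]
              exact (hmat (l + p * 0) (l + p * 1) (by omega) (by omega) (by omega)
                (by omega)).mpr ⟨by omega, by omega, by omega, by omega⟩)
            (by omega)]
        rw [hd1x, hd1y]
        split_ifs <;> first
          | (exfalso; omega)
          | (simp only [List.cons.injEq, and_true]; omega)
      · have hm2 : 2 ≤ M - 2*l := by
          rcases (by omega : M - 2*l = 1 ∨ 2 ≤ M - 2*l) with h | h
          · have := hdegM h; omega
          · exact h
        by_cases hC3 : K - c + 1 ≤ 2*(M - 2*l) + (N - 2*l) - 2
        · -- C3: K is reached on the downward leg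
          obtain ⟨mat1, heq1, hp1⟩ := runA_cont (M - 2*l).toNat K N M mat c (M - l) l 0 fuel
            (Or.inl rfl) hc1 (by omega) hK
            (by
              intro p hq1 hq2
              rw [hd0x, hd0y]
              refine ⟨⟨by omega, by omega, by omega, by omega⟩, ?_⟩
              exact (hmat (M - l + p * (-1)) (l + p * 0) (by omega) (by omega) (by omega)
                (by omega)).mpr ⟨by omega, by omega, by omega, by omega⟩)
            (by
              rw [hd0x, hd0y]
              by_cases hl0 : l = 0
              · left
                rintro ⟨hx, -, -, -⟩
                omega
              · right
                intro h0
                have := (hmat _ _ (by omega) (by omega) (by omega) (by omega)).mp h0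
                omega)
            (by omega)
          rw [heq1,
              show M - l + ((M - 2*l).toNat : Int) * dxA 0 = l by rw [hd0x]; omega,
              show l + ((M - 2*l).toNat : Int) * dyA 0 = l by rw [hd0y]; omega,
              show PySem.Int.mod (0 + 1) 4 = 1 by decide]
          obtain ⟨mat2, heq2, hp2⟩ := runA_cont (N - 2*l - 1).toNat K N M mat1
            (c + ((M - 2*l).toNat : Int)) l l 1 (fuel - ((M - 2*l).toNat + 1))
            (Or.inr (Or.inl rfl)) (by omega) (by omega) hK
            (by
              intro p hq1 hq2
              rw [hd1x, hd1y]
              refine ⟨⟨by omega, by omega, by omega, by omega⟩, ?_⟩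
              rw [(hp1 (l + p * 0) (l + p * 1)).2 (by
                rintro ⟨q, hr1, hr2, ha, hb⟩
                rw [hd0y] at hb
                omega)]
              exact (hmat (l + p * 0) (l + p * 1) (by omega) (by omega) (by omega)
                (by omega)).mpr ⟨by omega, by omega, by omega, by omega⟩)
            (by
              rw [hd1x, hd1y]
              by_cases hl0 : l = 0
              · left
                rintro ⟨-, -, -, hy⟩
                omega
              · right
                intro h0
                rw [(hp1 _ _).2 (by
                  rintro ⟨q, hr1, hr2, ha, hb⟩
                  rw [hd0y] at hb
                  omega)] at h0
                have := (hmat _ _ (by omega) (by omega) (by omega) (by omega)).mp h0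
                omega)
            (by omega)
          rw [heq2,
              show l + ((N - 2*l - 1).toNat : Int) * dxA 1 = l by rw [hd1x]; omega,
              show l + ((N - 2*l - 1).toNat : Int) * dyA 1 = N - l - 1 by rw [hd1y]; omega,
              show PySem.Int.mod (1 + 1) 4 = 2 by decide]
          rw [runA_ret (K - (c + ((M - 2*l).toNat : Int) + ((N - 2*l - 1).toNat : Int))).toNat
              K N M mat2 (c + ((M - 2*l).toNat : Int) + ((N - 2*l - 1).toNat : Int)) l (N - l - 1) 2
              (fuel - ((M - 2*l).toNat + 1) - ((N - 2*l - 1).toNat + 1))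
              (Or.inr (Or.inr (Or.inl rfl))) (by omega) hK
              (by
                intro p hq1 hq2
                rw [hd2x, hd2y]
                refine ⟨⟨by omega, by omega, by omega, by omega⟩, ?_⟩
                rw [(hp2 (l + p * 1) (N - l - 1 + p * 0)).2 (by
                  rintro ⟨q, hr1, hr2, ha, hb⟩
                  rw [hd1x] at ha
                  omega)]
                rw [(hp1 (l + p * 1) (N - l - 1 + p * 0)).2 (by
                  rintro ⟨q, hr1, hr2, ha, hb⟩
                  rw [hd0y] at hb
                  omega)]
                exact (hmat (l + p * 1) (N - l - 1 + p * 0) (by omega) (by omega) (by omega)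
                  (by omega)).mpr ⟨by omega, by omega, by omega, by omega⟩)
              (by omega)]
          rw [hd2x, hd2y]
          split_ifs <;> first
            | (exfalso; omega)
            | (simp only [List.cons.injEq, and_true]; omega)
        · by_cases hC4 : K - c + 1 ≤ 2*((N - 2*l) + (M - 2*l)) - 4
          · -- C4: K is reached on the leftward leg
            obtain ⟨mat1, heq1, hp1⟩ := runA_cont (M - 2*l).toNat K N M mat c (M - l) l 0 fuel
              (Or.inl rfl) hc1 (by omega) hK
              (by
                intro p hq1 hq2
                rw [hd0x, hd0y]
                refine ⟨⟨by omega, by omega, by omega, by omega⟩, ?_⟩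
                exact (hmat (M - l + p * (-1)) (l + p * 0) (by omega) (by omega) (by omega)
                  (by omega)).mpr ⟨by omega, by omega, by omega, by omega⟩)
              (by
                rw [hd0x, hd0y]
                by_cases hl0 : l = 0
                · left
                  rintro ⟨hx, -, -, -⟩
                  omega
                · right
                  intro h0
                  have := (hmat _ _ (by omega) (by omega) (by omega) (by omega)).mp h0
                  omega)
              (by omega)
            rw [heq1,
                show M - l + ((M - 2*l).toNat : Int) * dxA 0 = l by rw [hd0x]; omega,
                show l + ((M - 2*l).toNat : Int) * dyA 0 = l by rw [hd0y]; omega,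
                show PySem.Int.mod (0 + 1) 4 = 1 by decide]
            obtain ⟨mat2, heq2, hp2⟩ := runA_cont (N - 2*l - 1).toNat K N M mat1
              (c + ((M - 2*l).toNat : Int)) l l 1 (fuel - ((M - 2*l).toNat + 1))
              (Or.inr (Or.inl rfl)) (by omega) (by omega) hK
              (by
                intro p hq1 hq2
                rw [hd1x, hd1y]
                refine ⟨⟨by omega, by omega, by omega, by omega⟩, ?_⟩
                rw [(hp1 (l + p * 0) (l + p * 1)).2 (by
                  rintro ⟨q, hr1, hr2, ha, hb⟩
                  rw [hd0y] at hb
                  omega)]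
                exact (hmat (l + p * 0) (l + p * 1) (by omega) (by omega) (by omega)
                  (by omega)).mpr ⟨by omega, by omega, by omega, by omega⟩)
              (by
                rw [hd1x, hd1y]
                by_cases hl0 : l = 0
                · left
                  rintro ⟨-, -, -, hy⟩
                  omega
                · right
                  intro h0
                  rw [(hp1 _ _).2 (by
                    rintro ⟨q, hr1, hr2, ha, hb⟩
                    rw [hd0y] at hb
                    omega)] at h0
                  have := (hmat _ _ (by omega) (by omega) (by omega) (by omega)).mp h0
                  omega)
              (by omega)
            rw [heq2,
                show l + ((N - 2*l - 1).toNat : Int) * dxA 1 = l by rw [hd1x]; omega,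
                show l + ((N - 2*l - 1).toNat : Int) * dyA 1 = N - l - 1 by rw [hd1y]; omega,
                show PySem.Int.mod (1 + 1) 4 = 2 by decide]
            obtain ⟨mat3, heq3, hp3⟩ := runA_cont (M - 2*l - 1).toNat K N M mat2
              (c + ((M - 2*l).toNat : Int) + ((N - 2*l - 1).toNat : Int)) l (N - l - 1) 2
              (fuel - ((M - 2*l).toNat + 1) - ((N - 2*l - 1).toNat + 1))
              (Or.inr (Or.inr (Or.inl rfl))) (by omega) (by omega) hK
              (by
                intro p hq1 hq2
                rw [hd2x, hd2y]
                refine ⟨⟨by omega, by omega, by omega, by omega⟩, ?_⟩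
                rw [(hp2 (l + p * 1) (N - l - 1 + p * 0)).2 (by
                  rintro ⟨q, hr1, hr2, ha, hb⟩
                  rw [hd1x] at ha
                  omega)]
                rw [(hp1 (l + p * 1) (N - l - 1 + p * 0)).2 (by
                  rintro ⟨q, hr1, hr2, ha, hb⟩
                  rw [hd0y] at hb
                  omega)]
                exact (hmat (l + p * 1) (N - l - 1 + p * 0) (by omega) (by omega) (by omega)
                  (by omega)).mpr ⟨by omega, by omega, by omega, by omega⟩)
              (by
                rw [hd2x, hd2y]
                by_cases hl0 : l = 0
                · left
                  rintro ⟨-, hx, -, -⟩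
                  omega
                · right
                  intro h0
                  rw [(hp2 _ _).2 (by
                    rintro ⟨q, hr1, hr2, ha, hb⟩
                    rw [hd1x] at ha
                    omega)] at h0
                  rw [(hp1 _ _).2 (by
                    rintro ⟨q, hr1, hr2, ha, hb⟩
                    rw [hd0y] at hb
                    omega)] at h0
                  have := (hmat _ _ (by omega) (by omega) (by omega) (by omega)).mp h0
                  omega)
              (by omega)
            rw [heq3,
                show l + ((M - 2*l - 1).toNat : Int) * dxA 2 = M - l - 1 by rw [hd2x]; omega,
                show N - l - 1 + ((M - 2*l - 1).toNat : Int) * dyA 2 = N - l - 1 by rw [hd2y]; omega,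
                show PySem.Int.mod (2 + 1) 4 = 3 by decide]
            rw [runA_ret (K - (c + ((M - 2*l).toNat : Int) + ((N - 2*l - 1).toNat : Int)
                  + ((M - 2*l - 1).toNat : Int))).toNat K N M mat3
                (c + ((M - 2*l).toNat : Int) + ((N - 2*l - 1).toNat : Int) + ((M - 2*l - 1).toNat : Int))
                (M - l - 1) (N - l - 1) 3
                (fuel - ((M - 2*l).toNat + 1) - ((N - 2*l - 1).toNat + 1) - ((M - 2*l - 1).toNat + 1))
                (Or.inr (Or.inr (Or.inr rfl))) (by omega) hK
                (by
                  intro p hq1 hq2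
                  rw [hd3x, hd3y]
                  refine ⟨⟨by omega, by omega, by omega, by omega⟩, ?_⟩
                  rw [(hp3 (M - l - 1 + p * 0) (N - l - 1 + p * (-1))).2 (by
                    rintro ⟨q, hr1, hr2, ha, hb⟩
                    rw [hd2y] at hb
                    omega)]
                  rw [(hp2 (M - l - 1 + p * 0) (N - l - 1 + p * (-1))).2 (by
                    rintro ⟨q, hr1, hr2, ha, hb⟩
                    rw [hd1x] at ha
                    omega)]
                  rw [(hp1 (M - l - 1 + p * 0) (N - l - 1 + p * (-1))).2 (by
                    rintro ⟨q, hr1, hr2, ha, hb⟩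
                    rw [hd0y] at hb
                    omega)]
                  exact (hmat (M - l - 1 + p * 0) (N - l - 1 + p * (-1)) (by omega) (by omega)
                    (by omega) (by omega)).mpr ⟨by omega, by omega, by omega, by omega⟩)
                (by omega)]
            rw [hd3x, hd3y]
            split_ifs <;> first
              | (exfalso; omega)
              | (simp only [List.cons.injEq, and_true]; omega)
          · -- C5: K lies in an inner ring
            have hn3 : 3 ≤ N - 2*l := by
              rcases (by omega : N - 2*l = 2 ∨ 3 ≤ N - 2*l) with h | h
              · have := hdegN2 h; omega
              · exact h
            have hm3 : 3 ≤ M - 2*l := by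
              rcases (by omega : M - 2*l = 2 ∨ 3 ≤ M - 2*l) with h | h
              · have := hdegM2 h; omega
              · exact h
            obtain ⟨mat1, heq1, hp1⟩ := runA_cont (M - 2*l).toNat K N M mat c (M - l) l 0 fuel
              (Or.inl rfl) hc1 (by omega) hK
              (by
                intro p hq1 hq2
                rw [hd0x, hd0y]
                refine ⟨⟨by omega, by omega, by omega, by omega⟩, ?_⟩
                exact (hmat (M - l + p * (-1)) (l + p * 0) (by omega) (by omega) (by omega)
                  (by omega)).mpr ⟨by omega, by omega, by omega, by omega⟩)
              (by
                rw [hd0x, hd0y]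
                by_cases hl0 : l = 0
                · left
                  rintro ⟨hx, -, -, -⟩
                  omega
                · right
                  intro h0
                  have := (hmat _ _ (by omega) (by omega) (by omega) (by omega)).mp h0
                  omega)
              (by omega)
            rw [heq1,
                show M - l + ((M - 2*l).toNat : Int) * dxA 0 = l by rw [hd0x]; omega,
                show l + ((M - 2*l).toNat : Int) * dyA 0 = l by rw [hd0y]; omega,
                show PySem.Int.mod (0 + 1) 4 = 1 by decide]
            obtain ⟨mat2, heq2, hp2⟩ := runA_cont (N - 2*l - 1).toNat K N M mat1
              (c + ((M - 2*l).toNat : Int)) l l 1 (fuel - ((M - 2*l).toNat + 1))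
              (Or.inr (Or.inl rfl)) (by omega) (by omega) hK
              (by
                intro p hq1 hq2
                rw [hd1x, hd1y]
                refine ⟨⟨by omega, by omega, by omega, by omega⟩, ?_⟩
                rw [(hp1 (l + p * 0) (l + p * 1)).2 (by
                  rintro ⟨q, hr1, hr2, ha, hb⟩
                  rw [hd0y] at hb
                  omega)]
                exact (hmat (l + p * 0) (l + p * 1) (by omega) (by omega) (by omega)
                  (by omega)).mpr ⟨by omega, by omega, by omega, by omega⟩)
              (by
                rw [hd1x, hd1y]
                by_cases hl0 : l = 0
                · left
                  rintro ⟨-, -, -, hy⟩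
                  omega
                · right
                  intro h0
                  rw [(hp1 _ _).2 (by
                    rintro ⟨q, hr1, hr2, ha, hb⟩
                    rw [hd0y] at hb
                    omega)] at h0
                  have := (hmat _ _ (by omega) (by omega) (by omega) (by omega)).mp h0
                  omega)
              (by omega)
            rw [heq2,
                show l + ((N - 2*l - 1).toNat : Int) * dxA 1 = l by rw [hd1x]; omega,
                show l + ((N - 2*l - 1).toNat : Int) * dyA 1 = N - l - 1 by rw [hd1y]; omega,
                show PySem.Int.mod (1 + 1) 4 = 2 by decide]
            obtain ⟨mat3, heq3, hp3⟩ := runA_cont (M - 2*l - 1).toNat K N M mat2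
              (c + ((M - 2*l).toNat : Int) + ((N - 2*l - 1).toNat : Int)) l (N - l - 1) 2
              (fuel - ((M - 2*l).toNat + 1) - ((N - 2*l - 1).toNat + 1))
              (Or.inr (Or.inr (Or.inl rfl))) (by omega) (by omega) hK
              (by
                intro p hq1 hq2
                rw [hd2x, hd2y]
                refine ⟨⟨by omega, by omega, by omega, by omega⟩, ?_⟩
                rw [(hp2 (l + p * 1) (N - l - 1 + p * 0)).2 (by
                  rintro ⟨q, hr1, hr2, ha, hb⟩
                  rw [hd1x] at ha
                  omega)]
                rw [(hp1 (l + p * 1) (N - l - 1 + p * 0)).2 (by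
                  rintro ⟨q, hr1, hr2, ha, hb⟩
                  rw [hd0y] at hb
                  omega)]
                exact (hmat (l + p * 1) (N - l - 1 + p * 0) (by omega) (by omega) (by omega)
                  (by omega)).mpr ⟨by omega, by omega, by omega, by omega⟩)
              (by
                rw [hd2x, hd2y]
                by_cases hl0 : l = 0
                · left
                  rintro ⟨-, hx, -, -⟩
                  omega
                · right
                  intro h0
                  rw [(hp2 _ _).2 (by
                    rintro ⟨q, hr1, hr2, ha, hb⟩
                    rw [hd1x] at ha
                    omega)] at h0
                  rw [(hp1 _ _).2 (by
                    rintro ⟨q, hr1, hr2, ha, hb⟩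
                    rw [hd0y] at hb
                    omega)] at h0
                  have := (hmat _ _ (by omega) (by omega) (by omega) (by omega)).mp h0
                  omega)
              (by omega)
            rw [heq3,
                show l + ((M - 2*l - 1).toNat : Int) * dxA 2 = M - l - 1 by rw [hd2x]; omega,
                show N - l - 1 + ((M - 2*l - 1).toNat : Int) * dyA 2 = N - l - 1 by rw [hd2y]; omega,
                show PySem.Int.mod (2 + 1) 4 = 3 by decide]
            obtain ⟨mat4, heq4, hp4⟩ := runA_cont (N - 2*l - 2).toNat K N M mat3
              (c + ((M - 2*l).toNat : Int) + ((N - 2*l - 1).toNat : Int) + ((M - 2*l - 1).toNat : Int))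
              (M - l - 1) (N - l - 1) 3
              (fuel - ((M - 2*l).toNat + 1) - ((N - 2*l - 1).toNat + 1) - ((M - 2*l - 1).toNat + 1))
              (Or.inr (Or.inr (Or.inr rfl))) (by omega) (by omega) hK
              (by
                intro p hq1 hq2
                rw [hd3x, hd3y]
                refine ⟨⟨by omega, by omega, by omega, by omega⟩, ?_⟩
                rw [(hp3 (M - l - 1 + p * 0) (N - l - 1 + p * (-1))).2 (by
                  rintro ⟨q, hr1, hr2, ha, hb⟩
                  rw [hd2y] at hb
                  omega)]
                rw [(hp2 (M - l - 1 + p * 0) (N - l - 1 + p * (-1))).2 (by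
                  rintro ⟨q, hr1, hr2, ha, hb⟩
                  rw [hd1x] at ha
                  omega)]
                rw [(hp1 (M - l - 1 + p * 0) (N - l - 1 + p * (-1))).2 (by
                  rintro ⟨q, hr1, hr2, ha, hb⟩
                  rw [hd0y] at hb
                  omega)]
                exact (hmat (M - l - 1 + p * 0) (N - l - 1 + p * (-1)) (by omega) (by omega)
                  (by omega) (by omega)).mpr ⟨by omega, by omega, by omega, by omega⟩)
              (by
                rw [hd3x, hd3y]
                right
                intro h0
                rw [(hp3 _ _).2 (by
                  rintro ⟨q, hr1, hr2, ha, hb⟩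
                  rw [hd2y] at hb
                  omega)] at h0
                rw [(hp2 _ _).2 (by
                  rintro ⟨q, hr1, hr2, ha, hb⟩
                  rw [hd1x] at ha
                  omega)] at h0
                exact (hp1 _ _).1
                  ⟨1, by omega, by omega, by rw [hd0x]; omega, by rw [hd0y]; omega⟩ h0)
              (by omega)
            rw [heq4,
                show M - l - 1 + ((N - 2*l - 2).toNat : Int) * dxA 3 = M - (l + 1) by rw [hd3x]; omega,
                show N - l - 1 + ((N - 2*l - 2).toNat : Int) * dyA 3 = l + 1 by rw [hd3y]; omega,
                show PySem.Int.mod (3 + 1) 4 = 0 by decide]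
            have hmat' : ∀ x y : Int, -1 < x → x < M → -1 < y → y < N →
                (mat4 x y = 0 ↔ (l + 1 ≤ x ∧ x ≤ M - 1 - (l + 1) ∧ l + 1 ≤ y ∧ y ≤ N - 1 - (l + 1))) := by
              intro x y h1 h2 h3 h4
              constructor
              · intro h0
                have nm4 : ¬ Seg (M - l - 1) (N - l - 1) (dxA 3) (dyA 3)
                    (((N - 2*l - 2).toNat : Int)) x y := fun hmem => (hp4 x y).1 hmem h0
                have h03 : mat3 x y = 0 := by rw [← (hp4 x y).2 nm4]; exact h0
                have nm3 : ¬ Seg l (N - l - 1) (dxA 2) (dyA 2)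
                    (((M - 2*l - 1).toNat : Int)) x y := fun hmem => (hp3 x y).1 hmem h03
                have h02 : mat2 x y = 0 := by rw [← (hp3 x y).2 nm3]; exact h03
                have nm2 : ¬ Seg l l (dxA 1) (dyA 1)
                    (((N - 2*l - 1).toNat : Int)) x y := fun hmem => (hp2 x y).1 hmem h02
                have h01 : mat1 x y = 0 := by rw [← (hp2 x y).2 nm2]; exact h02
                have nm1 : ¬ Seg (M - l) l (dxA 0) (dyA 0)
                    (((M - 2*l).toNat : Int)) x y := fun hmem => (hp1 x y).1 hmem h01
                have h00 : mat x y = 0 := by rw [← (hp1 x y).2 nm1]; exact h01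
                have hrect := (hmat x y h1 h2 h3 h4).mp h00
                have f1 : ¬ (y = l ∧ l ≤ x ∧ x ≤ M - l - 1) := by
                  rintro ⟨e1, e2, e3⟩
                  exact nm1 ⟨M - l - x, by omega, by omega, by rw [hd0x]; omega, by rw [hd0y]; omega⟩
                have f2 : ¬ (x = l ∧ l + 1 ≤ y ∧ y ≤ N - l - 1) := by
                  rintro ⟨e1, e2, e3⟩
                  exact nm2 ⟨y - l, by omega, by omega, by rw [hd1x]; omega, by rw [hd1y]; omega⟩
                have f3 : ¬ (y = N - l - 1 ∧ l + 1 ≤ x ∧ x ≤ M - l - 1) := by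
                  rintro ⟨e1, e2, e3⟩
                  exact nm3 ⟨x - l, by omega, by omega, by rw [hd2x]; omega, by rw [hd2y]; omega⟩
                have f4 : ¬ (x = M - l - 1 ∧ l + 1 ≤ y ∧ y ≤ N - l - 2) := by
                  rintro ⟨e1, e2, e3⟩
                  exact nm4 ⟨N - l - 1 - y, by omega, by omega, by rw [hd3x]; omega, by rw [hd3y]; omega⟩
                omega
              · intro hr
                rw [(hp4 x y).2 (by
                      rintro ⟨q, hr1, hr2, ha, hb⟩
                      rw [hd3x] at ha
                      omega),
                    (hp3 x y).2 (by
                      rintro ⟨q, hr1, hr2, ha, hb⟩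
                      rw [hd2y] at hb
                      omega),
                    (hp2 x y).2 (by
                      rintro ⟨q, hr1, hr2, ha, hb⟩
                      rw [hd1x] at ha
                      omega),
                    (hp1 x y).2 (by
                      rintro ⟨q, hr1, hr2, ha, hb⟩
                      rw [hd0y] at hb
                      omega)]
                exact (hmat x y h1 h2 h3 h4).mpr ⟨by omega, by omega, by omega, by omega⟩
            rw [ih K N M (l + 1)
                (c + ((M - 2*l).toNat : Int) + ((N - 2*l - 1).toNat : Int)
                  + ((M - 2*l - 1).toNat : Int) + ((N - 2*l - 2).toNat : Int)) mat4
                (fuel - ((M - 2*l).toNat + 1) - ((N - 2*l - 1).toNat + 1) - ((M - 2*l - 1).toNat + 1)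
                  - ((N - 2*l - 2).toNat + 1))
                (by omega) (by omega) (by omega) (by omega) (by omega) (by omega) hK hmat'
                (by omega) (by omega)]
            rw [show K - (c + ((M - 2*l).toNat : Int) + ((N - 2*l - 1).toNat : Int)
                  + ((M - 2*l - 1).toNat : Int) + ((N - 2*l - 2).toNat : Int)) + 1
                = K - c + 1 - (2*(N - 2*l + (M - 2*l)) - 4) by omega]
            split_ifs <;> first
              | rfl
              | (exfalso; omega)

-- ===== VERDICT (by name: the statement is the Claim_ definition above) =====
theorem concert_spec : Claim_equal_concert := by
  intro K N M hdom hpre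
  unfold Spec_concert concert concert_alt
  by_cases hgt : K > N * M
  · rw [if_pos hgt, if_pos hgt]
  · rw [if_neg hgt, if_neg hgt]
    have hK1 : 1 ≤ K ∧ 1 ≤ N ∧ 1 ≤ M := by
      rcases hpre with h | h
      · exfalso; omega
      · exact h
    have hprod : (N - 2*0) * (M - 2*0) = N * M := by ring
    have hNM1 : 1 ≤ N * M := by nlinarith [hK1.2.1, hK1.2.2]
    have e := ring_step ((PySem.Int.floordiv (min N M + 1) 2).toNat) K N M 0 1
      (fun _ _ => (0 : Int)) ((4 * (N * M) + 4).toNat)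
      (by omega) (by omega) (by omega) (by omega)
      (by omega)
      (by omega) (by omega)
      (by
        intro x y h1 h2 h3 h4
        constructor
        · intro _
          exact ⟨by omega, by omega, by omega, by omega⟩
        · intro _
          rfl)
      (by omega)
      (by
        rw [PySem.Int.floordiv_eq_ediv_of_pos (by norm_num : (0:Int) < 2)]
        omega)
    rw [show M - (0:Int) = M from by ring, show K - 1 + (1:Int) = K from by ring] at e
    exact e
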